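-- pv_equiv track=rewrite | github.com/Gonie-Gonie/pydocs | src/docscriptor/model.py | _parse_bibtex_fields
-- ===== SOURCE A (Python) =====
-- def _parse_bibtex_fields(source: str) -> dict[str, str]:
--     fields: dict[str, str] = {}
--     for part in _split_bibtex_fields(source):
--         if "=" not in part:
--             continue
--         key, value = part.split("=", 1)
--         cleaned = value.strip().rstrip(",").strip()
--         if cleaned.startswith("{") and cleaned.endswith("}"):
--             cleaned = cleaned[1:-1]
--         elif cleaned.startswith('"') and cleaned.endswith('"'):
--             cleaned = cleaned[1:-1]
--         fields[key.strip().lower()] = cleaned.strip()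
--     return fields
--
-- def _split_bibtex_fields(source: str) -> list[str]:
--     parts: list[str] = []
--     depth = 0
--     current: list[str] = []
--
--     for char in source:
--         if char == "{":
--             depth += 1
--         elif char == "}":
--             depth = max(depth - 1, 0)
--
--         if char == "," and depth == 0:
--             part = "".join(current).strip()
--             if part:
--                 parts.append(part)
--             current = []
--             continue
--         current.append(char)
--
--     tail = "".join(current).strip()
--     if tail:
--         parts.append(tail)
--     return parts
-- ===== SOURCE B (Python) =====
-- def _parse_bibtex_fields(source: str) -> dict[str, str]:
--     # Stage 1: record the INDEX of every top-level comma (no buffers, no parts list).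
--     cuts = []
--     depth = 0
--     for i, ch in enumerate(source):
--         if ch == "{":
--             depth += 1
--         elif ch == "}":
--             depth = max(depth - 1, 0)
--         if ch == "," and depth == 0:
--             cuts.append(i)
--     # Stage 2: reconstruct the fields by slicing between consecutive cut indices.
--     starts = [0] + [i + 1 for i in cuts]
--     ends = cuts + [len(source)]
--     fields = {}
--     for a, b in zip(starts, ends):
--         part = source[a:b].strip()
--         if "=" not in part:
--             continue
--         eq = part.index("=")
--         key, value = part[:eq], part[eq + 1:]
--         cleaned = value.strip().rstrip(",").strip()
--         if (cleaned.startswith("{") and cleaned.endswith("}")) or \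
--            (cleaned.startswith('"') and cleaned.endswith('"')):
--             cleaned = cleaned[1:-1]
--         fields[key.strip().lower()] = cleaned.strip()
--     return fields
-- ===== Notes on version B (the rewrite author's own statement) =====
-- stated objective: alternative
-- what changed: A accumulates characters into a buffer, flushing it into a parts list at each top-level comma, then loops over the parts splitting each on the equals sign; B never builds buffers or a parts list: it first records only the integer indices of top-level commas, then reconstructs each field by index arithmetic (slicing source between consecutive cut positions) and parses each slice via the index of its first equals sign instead of split.
import Mathlib
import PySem

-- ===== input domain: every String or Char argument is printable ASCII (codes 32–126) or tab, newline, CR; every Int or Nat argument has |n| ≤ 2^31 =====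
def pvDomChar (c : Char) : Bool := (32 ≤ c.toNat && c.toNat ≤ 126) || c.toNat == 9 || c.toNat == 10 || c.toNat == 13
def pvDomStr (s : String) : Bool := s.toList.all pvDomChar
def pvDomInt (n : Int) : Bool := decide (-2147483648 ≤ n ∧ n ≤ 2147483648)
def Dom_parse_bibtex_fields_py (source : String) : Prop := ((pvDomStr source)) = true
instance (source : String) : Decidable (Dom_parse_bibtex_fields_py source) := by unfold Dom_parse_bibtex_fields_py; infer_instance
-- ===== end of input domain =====

-- B replaces A's buffer-accumulating split + per-part split('=') by an index-based scheme: record top-level-comma positions, then slice between them; objective: alternative (same cost), no speed claim.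


-- ===== PORT A =====
-- helpers are literal transliterations of A's two-phase code: _split_bibtex_fields then the per-part loop

-- one step of _split_bibtex_fields' for-loop; state = (parts, depth, current)
def pvSplitStepA (st : List (List Char) × Int × List Char) (c : Char) :
    List (List Char) × Int × List Char :=
  let parts := st.1
  let depth := st.2.1
  let current := st.2.2
  let depth := if c = '{' then depth + 1 else if c = '}' then max (depth - 1) 0 else depth
  if c = ',' ∧ depth = 0 then
    let part := PySem.Chars.strip current
    (if part = [] then parts else parts ++ [part], depth, [])
  else
    (parts, depth, current ++ [c])

-- _split_bibtex_fields
def pvSplitA (source : String) : List (List Char) :=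
  let st := source.toList.foldl pvSplitStepA ([], 0, [])
  let tail := PySem.Chars.strip st.2.2
  if tail = [] then st.1 else st.1 ++ [tail]

-- one iteration of the for-loop in _parse_bibtex_fields
-- part.split("=", 1) with '=' present is ported by hand as takeWhile/dropWhile-drop-1 (exact);
-- value.rstrip(",") is ported by hand as reverse/dropWhile (· == ',')/reverse (exact)
def pvProcA (fields : PySem.Dict String String) (part : List Char) : PySem.Dict String String :=
  if '=' ∈ part then
    let key := part.takeWhile (· ≠ '=')
    let value := (part.dropWhile (· ≠ '=')).drop 1
    let cleaned := PySem.Chars.strip (((PySem.Chars.strip value).reverse.dropWhile (· == ',')).reverse)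
    let cleaned :=
      if PySem.Chars.startswith cleaned ['{'] && PySem.Chars.endswith cleaned ['}'] then
        PySem.Chars.slice cleaned (some 1) (some (-1))
      else if PySem.Chars.startswith cleaned ['"'] && PySem.Chars.endswith cleaned ['"'] then
        PySem.Chars.slice cleaned (some 1) (some (-1))
      else cleaned
    fields.insert (String.ofList (PySem.Chars.lower (PySem.Chars.strip key))) (String.ofList (PySem.Chars.strip cleaned))
  else fields

def parse_bibtex_fields_py (source : String) : List (String × String) :=
  ((pvSplitA source).foldl pvProcA PySem.Dict.empty).items

-- ===== PORT B =====
-- Source B stage 1: for i, ch in enumerate(source): update depth; record i when ch==',' at depth 0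
def pvCutStep (st : Int × List Int) (ic : Int × Char) : Int × List Int :=
  let d := st.1
  let cuts := st.2
  let d := if ic.2 = '{' then d + 1 else if ic.2 = '}' then max (d - 1) 0 else d
  if ic.2 = ',' ∧ d = 0 then (d, cuts ++ [ic.1]) else (d, cuts)

-- Source B stage-2 loop body applied to the slice source[a:b]; part.index('=') is
-- PySem.List.index? (the '=' ∈ part guard makes the none branch unreachable, as in Python);
-- part[:eq] / part[eq+1:] with the nonnegative eq are take eq / drop (eq+1) (exact);
-- value.rstrip(",") is ported by hand as reverse/dropWhile (· == ',')/reverse (exact)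
def pvFieldB (fields : PySem.Dict String String) (seg : List Char) : PySem.Dict String String :=
  let part := PySem.Chars.strip seg
  if '=' ∈ part then
    match PySem.List.index? part '=' with
    | none => fields   -- unreachable: '=' ∈ part
    | some eq =>
      let key := part.take eq
      let value := part.drop (eq + 1)
      let cleaned := PySem.Chars.strip (((PySem.Chars.strip value).reverse.dropWhile (· == ',')).reverse)
      let cleaned :=
        if (PySem.Chars.startswith cleaned ['{'] && PySem.Chars.endswith cleaned ['}']) ||
           (PySem.Chars.startswith cleaned ['"'] && PySem.Chars.endswith cleaned ['"']) then
          PySem.Chars.slice cleaned (some 1) (some (-1))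
        else cleaned
      fields.insert (String.ofList (PySem.Chars.lower (PySem.Chars.strip key))) (String.ofList (PySem.Chars.strip cleaned))
  else fields

-- for a, b in zip(starts, ends): part = source[a:b].strip(); …
def pvProcB (cs : List Char) (fields : PySem.Dict String String) (ab : Int × Int) : PySem.Dict String String :=
  pvFieldB fields (PySem.Chars.slice cs (some ab.1) (some ab.2))

def parse_bibtex_fields_py_alt (source : String) : List (String × String) :=
  let cs := source.toList
  let cuts := ((PySem.List.enumerate cs 0).foldl pvCutStep (0, [])).2
  let starts := (0 : Int) :: cuts.map (· + 1)
  let ends := cuts ++ [(cs.length : Int)]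
  (((starts.zip ends).foldl (pvProcB cs) PySem.Dict.empty)).items

-- ===== PRECONDITION & SPEC =====
def Spec_parse_bibtex_fields_py (source : String) (out : List (String × String)) : Prop := out = parse_bibtex_fields_py_alt source
instance (source : String) (out : List (String × String)) : Decidable (Spec_parse_bibtex_fields_py source out) := by unfold Spec_parse_bibtex_fields_py; infer_instance

-- ===== CLAIM (what is proved, stated in full; the proofs are below) =====
def Claim_equal_parse_bibtex_fields_py : Prop := ∀ (source : String), Dom_parse_bibtex_fields_py source → Spec_parse_bibtex_fields_py source (parse_bibtex_fields_py source)

-- ===== LEMMAS AND PROOFS =====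

-- the shared depth update
def pvUpd (d : Int) (c : Char) : Int :=
  if c = '{' then d + 1 else if c = '}' then max (d - 1) 0 else d

-- reference segmentation: the raw (unstripped) top-level-comma segments
def pvSegs (d : Int) (cur : List Char) : List Char → List (List Char)
  | [] => [cur]
  | c :: cs =>
    let d' := pvUpd d c
    if c = ',' ∧ d' = 0 then cur :: pvSegs d' [] cs else pvSegs d' (cur ++ [c]) cs

def pvSlices (l : List Char) (starts ends : List Int) : List (List Char) :=
  (starts.zip ends).map (fun ab => PySem.Chars.slice l (some ab.1) (some ab.2))

theorem pvIfOr {α : Type} (a b : Bool) (x y : α) :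
    (if a || b then x else y) = (if a then x else if b then x else y) := by
  cases a <;> cases b <;> simp

-- L1: A's split = strip-and-filter of the reference segmentation
theorem pvL1 (cs : List Char) : ∀ (parts : List (List Char)) (d : Int) (cur : List Char),
    (if PySem.Chars.strip (cs.foldl pvSplitStepA (parts, d, cur)).2.2 = []
       then (cs.foldl pvSplitStepA (parts, d, cur)).1
       else (cs.foldl pvSplitStepA (parts, d, cur)).1
            ++ [PySem.Chars.strip (cs.foldl pvSplitStepA (parts, d, cur)).2.2])
    = parts ++ ((pvSegs d cur cs).map PySem.Chars.strip).filter (· ≠ []) := by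
  induction cs with
  | nil =>
    intro parts d cur
    by_cases h : PySem.Chars.strip cur = [] <;> simp [pvSegs, h]
  | cons c cs ih =>
    intro parts d cur
    simp only [List.foldl_cons, pvSegs]
    by_cases h : c = ',' ∧ pvUpd d c = 0
    · have hstep : pvSplitStepA (parts, d, cur) c
          = (if PySem.Chars.strip cur = [] then parts
             else parts ++ [PySem.Chars.strip cur], pvUpd d c, []) := by
        unfold pvSplitStepA pvUpd
        dsimp only
        rw [if_pos (by simpa [pvUpd] using h)]
      rw [hstep, if_pos h, ih]
      by_cases hc : PySem.Chars.strip cur = [] <;> simp [hc]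
    · have hstep : pvSplitStepA (parts, d, cur) c = (parts, pvUpd d c, cur ++ [c]) := by
        unfold pvSplitStepA pvUpd
        dsimp only
        rw [if_neg (by simpa [pvUpd] using h)]
      rw [hstep, if_neg h, ih]

-- L2: the cut fold only appends
theorem pvL2 (xs : List (Int × Char)) : ∀ (d : Int) (cuts : List Int),
    xs.foldl pvCutStep (d, cuts)
      = ((xs.foldl pvCutStep (d, [])).1, cuts ++ (xs.foldl pvCutStep (d, [])).2) := by
  induction xs with
  | nil => intro d cuts; simp
  | cons x xs ih =>
    intro d cuts
    have hstep : ∀ (c : List Int), pvCutStep (d, c) x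
        = ((pvCutStep (d, ([] : List Int)) x).1, c ++ (pvCutStep (d, ([] : List Int)) x).2) := by
      intro c
      unfold pvCutStep
      dsimp only
      split_ifs <;> simp
    simp only [List.foldl_cons]
    rw [hstep cuts, hstep []]
    rcases h : pvCutStep (d, ([] : List Int)) x with ⟨d', δ⟩
    dsimp only
    rw [List.nil_append, ih d' (cuts ++ δ), ih d' δ]
    simp

-- L3: B's slices between cut indices = the reference segmentation
theorem pvL3 (cs : List Char) : ∀ (l : List Char) (k : Nat), l.drop k = cs →
    ∀ (s : Nat), s ≤ k → ∀ (d : Int),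
    pvSlices l ((s : Int) :: ((( PySem.List.enumerate cs (k : Int)).foldl pvCutStep (d, [])).2).map (· + 1))
      ((((PySem.List.enumerate cs (k : Int)).foldl pvCutStep (d, [])).2) ++ [(l.length : Int)])
    = pvSegs d ((l.drop s).take (k - s)) cs := by
  induction cs with
  | nil =>
    intro l k hk s hs d
    have hlen : l.length ≤ k := by
      by_contra hc
      exact absurd hk (by simp [List.drop_eq_nil_iff]; omega)
    simp only [PySem.List.enumerate_nil, List.foldl_nil, pvSegs, pvSlices, List.map_nil,
      List.nil_append, List.zip_cons_cons, List.zip_nil_right, List.map_cons,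
      PySem.Chars.slice_eq_listSlice, PySem.List.slice_natCast]
    have h1 : (l.drop s).take (l.length - s) = l.drop s := List.take_of_length_le (by simp)
    have h2 : (l.drop s).take (k - s) = l.drop s := List.take_of_length_le (by simp; omega)
    rw [h1, h2]
  | cons c cs ih =>
    intro l k hk s hs d
    have hkl : k < l.length := by
      by_contra hc
      rw [List.drop_eq_nil_of_le (by omega)] at hk
      exact List.cons_ne_nil _ _ hk.symm
    have hk' : l.drop (k + 1) = cs := by
      have := congrArg (List.drop 1) hk
      simpa [List.drop_drop] using this
    have hgetk : l[k]? = some c := by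
      have := congrArg (fun t => t[0]?) hk
      simpa [List.getElem?_drop] using this
    rw [PySem.List.enumerate_cons, List.foldl_cons]
    have hcast : (k : Int) + 1 = ((k + 1 : Nat) : Int) := by push_cast; ring
    by_cases h : c = ',' ∧ pvUpd d c = 0
    · have hstep : pvCutStep (d, ([] : List Int)) ((k : Int), c) = (pvUpd d c, [(k : Int)]) := by
        unfold pvCutStep pvUpd
        dsimp only
        rw [if_pos (by simpa [pvUpd] using h)]
        rfl
      rw [hstep, pvL2, hcast]
      simp only [pvSlices, List.map_cons, List.cons_append, List.nil_append, List.zip_cons_cons,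
        List.map_cons, PySem.Chars.slice_eq_listSlice]
      rw [show ((k : Int) + 1) = ((k + 1 : Nat) : Int) from hcast]
      have htail := ih l (k + 1) hk' (k + 1) le_rfl (pvUpd d c)
      simp only [pvSlices, PySem.Chars.slice_eq_listSlice, Nat.sub_self, List.take_zero] at htail
      rw [htail]
      simp only [pvSegs]
      rw [if_pos h, PySem.List.slice_natCast]
    · have hstep : pvCutStep (d, ([] : List Int)) ((k : Int), c) = (pvUpd d c, []) := by
        unfold pvCutStep pvUpd
        dsimp only
        rw [if_neg (by simpa [pvUpd] using h)]
      rw [hstep, hcast]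
      have htail := ih l (k + 1) hk' s (by omega) (pvUpd d c)
      rw [htail]
      simp only [pvSegs]
      rw [if_neg h]
      congr 1
      rw [show k + 1 - s = (k - s) + 1 by omega, List.take_add_one]
      simp [List.getElem?_drop, show s + (k - s) = k by omega, hgetk]

theorem pvTakeWhileEq (pre suf : List Char) (h : '=' ∉ pre) :
    (pre ++ '=' :: suf).takeWhile (fun c => c ≠ '=') = pre := by
  induction pre with
  | nil => simp
  | cons a l ih =>
    simp only [List.mem_cons, not_or] at h
    have ha : a ≠ '=' := fun e => h.1 e.symm
    rw [List.cons_append, List.takeWhile_cons, if_pos (by simpa using ha)]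
    exact congrArg _ (ih h.2)

theorem pvDropWhileEq (pre suf : List Char) (h : '=' ∉ pre) :
    (pre ++ '=' :: suf).dropWhile (fun c => c ≠ '=') = '=' :: suf := by
  induction pre with
  | nil => simp
  | cons a l ih =>
    simp only [List.mem_cons, not_or] at h
    have ha : a ≠ '=' := fun e => h.1 e.symm
    rw [List.cons_append, List.dropWhile_cons, if_pos (by simpa using ha)]
    exact ih h.2

-- L5a: B's per-slice body = A's per-part body on the stripped slice
theorem pvL5a (fields : PySem.Dict String String) (seg : List Char) :
    pvFieldB fields seg = pvProcA fields (PySem.Chars.strip seg) := by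
  unfold pvFieldB pvProcA
  by_cases hm : '=' ∈ PySem.Chars.strip seg
  · obtain ⟨eq, heq⟩ := Option.isSome_iff_exists.mp
      ((PySem.List.index?_isSome_iff (PySem.Chars.strip seg) '=').mpr hm)
    obtain ⟨pre, suf, hps, hlen, hnp⟩ := (PySem.List.index?_eq_some_iff _ _ _).mp heq
    rw [if_pos hm, if_pos hm, heq]
    dsimp only
    have hkey : (PySem.Chars.strip seg).take eq
        = (PySem.Chars.strip seg).takeWhile (fun c => c ≠ '=') := by
      rw [hps, ← hlen, List.take_left, pvTakeWhileEq pre suf hnp]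
    have hval : (PySem.Chars.strip seg).drop (eq + 1)
        = ((PySem.Chars.strip seg).dropWhile (fun c => c ≠ '=')).drop 1 := by
      rw [hps, ← hlen, pvDropWhileEq pre suf hnp,
          show pre ++ '=' :: suf = (pre ++ ['=']) ++ suf by simp,
          List.drop_left' (by simp)]
      simp
    rw [hkey, hval, pvIfOr]
  · rw [if_neg hm, if_neg hm]

-- L5: folding B's body over raw segments = folding A's body over stripped nonempty parts
theorem pvL5 (segs : List (List Char)) : ∀ (fields : PySem.Dict String String),
    segs.foldl pvFieldB fields
      = ((segs.map PySem.Chars.strip).filter (· ≠ [])).foldl pvProcA fields := by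
  induction segs with
  | nil => intro fields; rfl
  | cons seg segs ih =>
    intro fields
    simp only [List.foldl_cons, List.map_cons, List.filter_cons]
    rw [pvL5a]
    by_cases h : PySem.Chars.strip seg = []
    · have : pvProcA fields (PySem.Chars.strip seg) = fields := by
        unfold pvProcA; rw [h]; simp
      rw [this, h]
      simpa using ih fields
    · rw [if_pos (by simpa using h)]
      simp only [List.foldl_cons]
      exact ih _

-- ===== VERDICT (by name: the statement is the Claim_ definition above) =====
theorem parse_bibtex_fields_py_spec : Claim_equal_parse_bibtex_fields_py := by
  intro source _
  have hA : pvSplitA source = ((pvSegs 0 [] source.toList).map PySem.Chars.strip).filter (· ≠ []) := by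
    unfold pvSplitA
    simpa using pvL1 source.toList [] 0 []
  have h3 := pvL3 source.toList source.toList 0 rfl 0 le_rfl 0
  simp only [Nat.cast_zero, List.drop_zero, Nat.sub_self, List.take_zero] at h3
  have hB : parse_bibtex_fields_py_alt source
      = ((pvSegs 0 [] source.toList).foldl pvFieldB PySem.Dict.empty).items := by
    unfold parse_bibtex_fields_py_alt
    dsimp only
    rw [← h3]
    unfold pvSlices
    rw [List.foldl_map]
    rfl
  unfold Spec_parse_bibtex_fields_py parse_bibtex_fields_py
  rw [hA, hB, pvL5]
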